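-- pv_equiv track=rewrite | github.com/TAI-lll/intern | match.py | find_mismatched_brackets
-- ===== SOURCE A (Python) =====
-- def find_mismatched_brackets(string):
--     stack = []
--     mismatched_positions = []
--
--     for i, char in enumerate(string):
--         if char == '(':
--             stack.append(i)
--         elif char == ')':
--             if stack:
--                 stack.pop()
--             else:
--                 mismatched_positions.append(i)
--
--     for i in stack:
--         mismatched_positions.append(i)
--
--     # 不匹配位置按顺序排列
--     mismatched_positions.sort()
--
--     return mismatched_positions
-- ===== SOURCE B (Python) =====
-- def find_mismatched_brackets(string):
--     closers = []
--     bal = 0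
--     for i, ch in enumerate(string):
--         if ch == '(':
--             bal += 1
--         elif ch == ')':
--             if bal:
--                 bal -= 1
--             else:
--                 closers.append(i)
--     need = 0
--     opens = []
--     for i, ch in reversed(list(enumerate(string))):
--         if ch == ')':
--             need += 1
--         elif ch == '(':
--             if need:
--                 need -= 1
--             else:
--                 opens.append(i)
--     opens.reverse()
--     return closers + opens
-- ===== Notes on version B (the rewrite author's own statement) =====
-- stated objective: alternative
-- what changed: B replaces A's position stack plus final sort with two stack-free counter scans: a forward pass records unmatched ')' positions and a backward pass records unmatched '(' positions, and the two ascending lists are concatenated, so no stack of positions and no sort are needed.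
import Mathlib
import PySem

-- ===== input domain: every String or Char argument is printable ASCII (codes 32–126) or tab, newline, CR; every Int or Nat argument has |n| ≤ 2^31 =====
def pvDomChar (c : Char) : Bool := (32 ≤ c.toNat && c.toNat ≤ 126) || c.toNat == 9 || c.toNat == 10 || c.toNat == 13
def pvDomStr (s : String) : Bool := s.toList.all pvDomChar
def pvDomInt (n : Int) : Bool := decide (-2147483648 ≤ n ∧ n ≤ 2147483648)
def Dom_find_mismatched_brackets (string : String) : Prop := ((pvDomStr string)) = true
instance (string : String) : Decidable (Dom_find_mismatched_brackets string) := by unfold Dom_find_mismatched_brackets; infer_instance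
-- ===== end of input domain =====

-- B replaces A's position stack and final sort with two stack-free counter scans (a forward
-- scan for unmatched ')' and a backward scan for unmatched '('); objective: alternative.

-- ===== PORT A =====
-- A's loop body: state = (stack, mismatched_positions), Python lists (append at end, pop last)
def stepA (s : List Int × List Int) (p : Int × Char) : List Int × List Int :=
  if p.2 = '(' then (s.1 ++ [p.1], s.2)
  else if p.2 = ')' then
    if s.1 ≠ [] then (s.1.dropLast, s.2) else (s.1, s.2 ++ [p.1])
  else s

def find_mismatched_brackets (string : String) : List Int :=
  let r := (PySem.List.enumerate string.toList).foldl stepA ([], [])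
  -- for i in stack: mismatched_positions.append(i)
  let m := r.1.foldl (fun m i => m ++ [i]) r.2
  -- mismatched_positions.sort()
  PySem.List.sorted m (fun x => x) false

-- ===== PORT B =====
-- forward pass: state = (bal, closers); backward pass: state = (need, opens, collected in
-- descending order and reversed at the end)
def stepB1 (s : Int × List Int) (p : Int × Char) : Int × List Int :=
  if p.2 = '(' then (s.1 + 1, s.2)
  else if p.2 = ')' then
    if s.1 ≠ 0 then (s.1 - 1, s.2) else (s.1, s.2 ++ [p.1])
  else s

def stepB2 (s : Int × List Int) (p : Int × Char) : Int × List Int :=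
  if p.2 = ')' then (s.1 + 1, s.2)
  else if p.2 = '(' then
    if s.1 ≠ 0 then (s.1 - 1, s.2) else (s.1, s.2 ++ [p.1])
  else s


def find_mismatched_brackets_alt (string : String) : List Int :=
  let f := (PySem.List.enumerate string.toList).foldl stepB1 (0, [])
  let g := (PySem.List.enumerate string.toList).reverse.foldl stepB2 (0, [])
  f.2 ++ g.2.reverse

-- ===== PRECONDITION & SPEC =====
def Spec_find_mismatched_brackets (string : String) (out : List Int) : Prop := out = find_mismatched_brackets_alt string
instance (string : String) (out : List Int) : Decidable (Spec_find_mismatched_brackets string out) := by unfold Spec_find_mismatched_brackets; infer_instance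

-- ===== CLAIM (what is proved, stated in full; the proofs are below) =====
def Claim_equal_find_mismatched_brackets : Prop := ∀ (string : String), Dom_find_mismatched_brackets string → Spec_find_mismatched_brackets string (find_mismatched_brackets string)

-- ===== LEMMAS AND PROOFS =====

-- Head-recursive characterization: Hchar l = (unmatched ')' positions, leftover '(' positions),
-- each in order of occurrence, for an indexed character list l.
def Hchar : List (Int × Char) → List Int × List Int
  | [] => ([], [])
  | (i, ch) :: t =>
      let r := Hchar t
      if ch = '(' then
        match r.1 with
        | [] => ([], i :: r.2)
        | _ :: cl' => (cl', r.2)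
      else if ch = ')' then (i :: r.1, r.2)
      else r

theorem Hchar_open_nil (i : Int) (t : List (Int × Char)) (h : (Hchar t).1 = []) :
    Hchar ((i, '(') :: t) = ([], i :: (Hchar t).2) := by simp [Hchar, h]
theorem Hchar_open_cons (i a : Int) (cl' : List Int) (t : List (Int × Char))
    (h : (Hchar t).1 = a :: cl') : Hchar ((i, '(') :: t) = (cl', (Hchar t).2) := by
  simp [Hchar, h]
theorem Hchar_close (i : Int) (t : List (Int × Char)) :
    Hchar ((i, ')') :: t) = (i :: (Hchar t).1, (Hchar t).2) := by simp [Hchar]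
theorem Hchar_other (i : Int) (ch : Char) (t : List (Int × Char))
    (h1 : ch ≠ '(') (h2 : ch ≠ ')') : Hchar ((i, ch) :: t) = Hchar t := by
  simp [Hchar, h1, h2]


theorem foldA_eq (l : List (Int × Char)) : ∀ (st mis : List Int),
    l.foldl stepA (st, mis) =
      (st.take (st.length - (Hchar l).1.length) ++ (Hchar l).2,
       mis ++ (Hchar l).1.drop st.length) := by
  induction l with
  | nil => intro st mis; simp [Hchar]
  | cons p t ih =>
    obtain ⟨i, ch⟩ := p
    intro st mis
    rw [List.foldl_cons]
    by_cases h1 : ch = '('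
    · subst h1
      rw [show stepA (st, mis) (i, '(') = (st ++ [i], mis) by simp [stepA], ih]
      rcases hcl : (Hchar t).1 with _ | ⟨a, cl'⟩
      · rw [Hchar_open_nil i t hcl]
        dsimp only
        simp [List.take_of_length_le]
      · rw [Hchar_open_cons i a cl' t hcl]
        dsimp only
        simp only [Prod.mk.injEq]
        refine ⟨?_, ?_⟩
        · have he : (st ++ [i]).length - (a :: cl').length = st.length - cl'.length := by
            simp
          rw [he, List.take_append_of_le_length (by omega)]
        · simp
    · by_cases h2 : ch = ')'
      · subst h2
        by_cases h3 : st = []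
        · subst h3
          rw [show stepA ([], mis) (i, ')') = ([], mis ++ [i]) by simp [stepA], ih,
            Hchar_close]
          simp
        · have hk : 1 ≤ st.length := List.length_pos_of_ne_nil h3
          rw [show stepA (st, mis) (i, ')') = (st.dropLast, mis) by simp [stepA, h3], ih,
            Hchar_close]
          simp only [Prod.mk.injEq, List.length_cons]
          refine ⟨?_, ?_⟩
          · have e1 : st.dropLast.length - (Hchar t).1.length = st.length - ((Hchar t).1.length + 1) := by
              rw [List.length_dropLast]; omega
            rw [e1, List.dropLast_eq_take, List.take_take]
            have e2 : min (st.length - ((Hchar t).1.length + 1)) (st.length - 1) = st.length - ((Hchar t).1.length + 1) := by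
              omega
            rw [e2]
          · have h5 : (i :: (Hchar t).1).drop st.length = ((i :: (Hchar t).1).drop 1).drop (st.length - 1) := by
              rw [List.drop_drop]
              congr 1
              omega
            rw [List.length_dropLast, h5]
            rfl
      · rw [show stepA (st, mis) (i, ch) = (st, mis) by simp [stepA, h1, h2], ih,
          Hchar_other i ch t h1 h2]

theorem foldB1_eq (l : List (Int × Char)) : ∀ (st mis : List Int),
    l.foldl stepB1 ((st.length : Int), mis) =
      (((l.foldl stepA (st, mis)).1.length : Int), (l.foldl stepA (st, mis)).2) := by
  induction l with
  | nil => intro st mis; simp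
  | cons p t ih =>
    obtain ⟨i, ch⟩ := p
    intro st mis
    rw [List.foldl_cons, List.foldl_cons]
    by_cases h1 : ch = '('
    · subst h1
      rw [show stepA (st, mis) (i, '(') = (st ++ [i], mis) by simp [stepA],
        show stepB1 ((st.length : Int), mis) (i, '(') = ((st.length : Int) + 1, mis) by simp [stepB1],
        show ((st.length : Int) + 1) = (((st ++ [i]).length : Nat) : Int) by simp]
      exact ih (st ++ [i]) mis
    · by_cases h2 : ch = ')'
      · subst h2
        by_cases h3 : st = []
        · subst h3
          rw [show stepA ([], mis) (i, ')') = ([], mis ++ [i]) by simp [stepA],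
            show stepB1 (((List.length ([] : List Int)) : Int), mis) (i, ')') = (((List.length ([] : List Int)) : Int), mis ++ [i]) by simp [stepB1]]
          exact ih [] (mis ++ [i])
        · have hk : 1 ≤ st.length := List.length_pos_of_ne_nil h3
          rw [show stepA (st, mis) (i, ')') = (st.dropLast, mis) by simp [stepA, h3],
            show stepB1 ((st.length : Int), mis) (i, ')') = ((st.length : Int) - 1, mis) by
              simp [stepB1, h3],
            show ((st.length : Int) - 1) = ((st.dropLast.length : Nat) : Int) by
              rw [List.length_dropLast]; omega]
          exact ih st.dropLast mis
      · rw [show stepA (st, mis) (i, ch) = (st, mis) by simp [stepA, h1, h2],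
          show stepB1 ((st.length : Int), mis) (i, ch) = ((st.length : Int), mis) by simp [stepB1, h1, h2]]
        exact ih st mis


theorem foldB2_eq (l : List (Int × Char)) :
    l.reverse.foldl stepB2 (0, []) = (((Hchar l).1.length : Int), (Hchar l).2.reverse) := by
  rw [List.foldl_reverse]
  induction l with
  | nil => simp [Hchar]
  | cons p t ih =>
    obtain ⟨i, ch⟩ := p
    rw [List.foldr_cons, ih]
    by_cases h2 : ch = ')'
    · subst h2
      rw [Hchar_close,
        show stepB2 (((Hchar t).1.length : Int), (Hchar t).2.reverse) (i, ')')
          = (((Hchar t).1.length : Int) + 1, (Hchar t).2.reverse) by simp [stepB2]]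
      simp
    · by_cases h1 : ch = '('
      · subst h1
        rcases hcl : (Hchar t).1 with _ | ⟨a, cl'⟩
        · rw [Hchar_open_nil i t hcl]
          dsimp only
          simp [stepB2]
        · rw [Hchar_open_cons i a cl' t hcl]
          dsimp only
          simp [stepB2]
          omega
      · rw [Hchar_other i ch t h1 h2,
          show stepB2 (((Hchar t).1.length : Int), (Hchar t).2.reverse) (i, ch)
            = (((Hchar t).1.length : Int), (Hchar t).2.reverse) by simp [stepB2, h1, h2]]

theorem Hchar_sorted (l : List (Int × Char)) (hp : l.Pairwise (fun p q => p.1 < q.1)) :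
    ((Hchar l).1 ++ (Hchar l).2).Pairwise (· < ·) ∧
      ∀ x ∈ (Hchar l).1 ++ (Hchar l).2, x ∈ l.map Prod.fst := by
  induction l with
  | nil => simp [Hchar]
  | cons p t ih =>
    obtain ⟨i, ch⟩ := p
    rw [List.pairwise_cons] at hp
    obtain ⟨hlt, hpt⟩ := hp
    obtain ⟨ihp, ihm⟩ := ih hpt
    have hmem : ∀ x ∈ (Hchar t).1 ++ (Hchar t).2, i < x := by
      intro x hx
      obtain ⟨q, hq, hqe⟩ := List.mem_map.mp (ihm x hx)
      have := hlt q hq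
      omega
    by_cases h1 : ch = '('
    · subst h1
      rcases hcl : (Hchar t).1 with _ | ⟨a, cl'⟩
      · rw [Hchar_open_nil i t hcl]
        dsimp only
        constructor
        · rw [List.nil_append, List.pairwise_cons]
          refine ⟨fun x hx => hmem x (by simp [hcl, hx]), ?_⟩
          rw [hcl] at ihp
          simpa using ihp
        · intro x hx
          rw [List.nil_append, List.mem_cons] at hx
          rcases hx with rfl | hx
          · simp
          · simpa using Or.inr (List.mem_map.mp (ihm x (by simp [hcl, hx])))
      · rw [Hchar_open_cons i a cl' t hcl]
        dsimp only
        constructor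
        · have hsub : (cl' ++ (Hchar t).2).Sublist ((a :: cl') ++ (Hchar t).2) :=
            List.Sublist.append (List.sublist_cons_self a cl') (List.Sublist.refl _)
          rw [hcl] at ihp
          exact ihp.sublist hsub
        · intro x hx
          have hx' : x ∈ (Hchar t).1 ++ (Hchar t).2 := by
            rw [hcl]
            rcases List.mem_append.mp hx with h | h
            · exact List.mem_append.mpr (Or.inl (List.mem_cons_of_mem a h))
            · exact List.mem_append.mpr (Or.inr h)
          simpa using Or.inr (List.mem_map.mp (ihm x hx'))
    · by_cases h2 : ch = ')'
      · subst h2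
        rw [Hchar_close]
        dsimp only
        constructor
        · rw [List.cons_append, List.pairwise_cons]
          exact ⟨hmem, ihp⟩
        · intro x hx
          rw [List.cons_append, List.mem_cons] at hx
          rcases hx with rfl | hx
          · simp
          · simpa using Or.inr (List.mem_map.mp (ihm x hx))
      · rw [Hchar_other i ch t h1 h2]
        refine ⟨ihp, fun x hx => ?_⟩
        simpa using Or.inr (List.mem_map.mp (ihm x hx))

-- ===== VERDICT (by name: the statement is the Claim_ definition above) =====
theorem find_mismatched_brackets_spec : Claim_equal_find_mismatched_brackets := by
  intro s _
  unfold Spec_find_mismatched_brackets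

  unfold find_mismatched_brackets find_mismatched_brackets_alt
  have hA := foldA_eq (PySem.List.enumerate s.toList) [] []
  simp only [List.length_nil, Nat.zero_sub, List.take_zero, List.nil_append,
    List.drop_zero] at hA
  have hB1 := foldB1_eq (PySem.List.enumerate s.toList) [] []
  simp only [List.length_nil, Nat.cast_zero] at hB1
  have hB2 := foldB2_eq (PySem.List.enumerate s.toList)
  simp only [hA, hB1, hB2]
  rw [PySem.List.foldl_append_singleton]
  obtain ⟨hpw, -⟩ := Hchar_sorted (PySem.List.enumerate s.toList)
    (PySem.List.pairwise_lt_enumerate s.toList 0)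
  rw [List.reverse_reverse]
  exact PySem.List.sorted_eq_of_perm_of_pairwise_lt _ _ _
    (List.Perm.refl _) hpw
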